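-- pv_equiv track=rewrite | github.com/CognitiveComputingResearchGroup/sudoku | sudoku.py | get_box_sets
-- ===== SOURCE A (Python) =====
-- row_slices = [ (0,3), (3,6), (6,9) ]
--
-- row_boxes = lambda row: [3 * int(row/3) + i for i in range(3) ]
--
-- def get_box_sets(puzzle):
--     """ get_box_sets(puzzle): Return a list of sets indexed by box number.
--         Sets contain already solved numbers in a box."""
--
--     # box_sets: dict needed for updating; convert to list afterwards
--     box_sets = dict()
--     for row_num, row in enumerate(puzzle):
--         boxes = row_boxes(row_num)
--         for box, row_slice in zip(boxes, row_slices):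
--         # Iterate over the appropriate boxes and slices for this row,
--         # updating sets with as needed with already solved numbers
--             update = set(row[slice(*row_slice)])
--             if box in box_sets:
--                 box_sets[box].update(update)
--                 # set.update(), not dict.update()
--             else:
--                 box_sets[box] = set(update)
--
--     result = list()
--     for box in range(9):
--         result.append(box_sets[box])
--         if 0 in result[box]:
--             result[box].remove(0)
--
--     return result
-- ===== SOURCE B (Python) =====
-- def get_box_sets(puzzle):
--     """get_box_sets(puzzle): Return a list of sets indexed by box number.
--        Sets contain already solved numbers in a box."""
--     result = []
--     for box in range(9):
--         r0 = 3 * (box // 3)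
--         c0 = 3 * (box % 3)
--         cells = (set(puzzle[r0][c0:c0 + 3])
--                  | set(puzzle[r0 + 1][c0:c0 + 3])
--                  | set(puzzle[r0 + 2][c0:c0 + 3]))
--         result.append(cells - {0})
--     return result
-- ===== Notes on version B (the rewrite author's own statement) =====
-- stated objective: simpler
-- what changed: Replaces the row-by-row scatter into a dict of box sets (enumerate rows, zip boxes with slices, conditional dict update, then a second pass converting the dict to a list) with a direct box-by-box gather: for each box 0..8 union the three 3-cell slices of its band's rows (indexed directly, as in a 9x9 grid) and subtract {0}; the dict accumulator and the key-presence branch disappear.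
import Mathlib
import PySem

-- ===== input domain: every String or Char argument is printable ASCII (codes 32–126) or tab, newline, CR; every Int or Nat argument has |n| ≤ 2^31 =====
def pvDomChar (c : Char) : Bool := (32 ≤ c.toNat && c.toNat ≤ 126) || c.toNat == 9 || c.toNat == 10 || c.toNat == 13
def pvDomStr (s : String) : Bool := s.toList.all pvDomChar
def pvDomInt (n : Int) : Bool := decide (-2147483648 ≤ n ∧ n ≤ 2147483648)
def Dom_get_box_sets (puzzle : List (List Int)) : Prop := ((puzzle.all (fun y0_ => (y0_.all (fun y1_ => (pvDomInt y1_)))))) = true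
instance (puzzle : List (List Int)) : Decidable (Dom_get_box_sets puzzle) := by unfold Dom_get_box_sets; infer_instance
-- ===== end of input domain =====

-- B replaces A's row-by-row scatter into a dict of box sets (enumerate + zip + conditional
-- dict update + a second dict-to-list pass) with a direct box-by-box gather: union the three
-- 3-cell row slices of each box's band and drop 0. Same return value on 9-row puzzles (Pre_).

-- ===== PORT A =====
-- row_slices = [(0,3),(3,6),(6,9)]
def pvRowSlices : List (Int × Int) := [(0, 3), (3, 6), (6, 9)]

-- row_boxes = lambda row: [3 * int(row/3) + i for i in range(3)]
-- (int(row/3) is float division truncated; it is exactly floordiv for the nonnegative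
-- row indices that enumerate supplies)
def pvRowBoxes (row : Int) : List Int :=
  (PySem.List.pyRange 0 3 1).map (fun i => 3 * PySem.Int.floordiv row 3 + i)

-- body of A's outer loop for one (row_num, row): the zipped inner loop over boxes/slices
def pvStepRow (d : PySem.Dict Int (PySem.Set Int)) (rowNum : Int) (row : List Int) :
    PySem.Dict Int (PySem.Set Int) :=
  ((pvRowBoxes rowNum).zip pvRowSlices).foldl
    (fun d q =>
      let update := PySem.Set.ofList (PySem.List.slice row (some q.2.1) (some q.2.2))
      if d.contains q.1 then
        d.modify q.1 PySem.Set.empty (fun s => PySem.Set.update s update)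
      else
        d.insert q.1 update)
    d

-- 'for row_num, row in enumerate(puzzle):' as structural recursion carrying row_num
def pvRowLoop : List (List Int) → Int → PySem.Dict Int (PySem.Set Int) → PySem.Dict Int (PySem.Set Int)
  | [], _, d => d
  | row :: rest, n, d => pvRowLoop rest (n + 1) (pvStepRow d n row)

def get_box_sets (puzzle : List (List Int)) : List (List Int) :=
  let box_sets := pvRowLoop puzzle 0 PySem.Dict.empty
  (PySem.List.pyRange 0 9 1).foldl
    (fun result box =>
      -- box_sets[box] raises KeyError when the key is absent (Pre_ excludes those inputs);
      -- getD ∅ is the totalisation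
      let s := box_sets.getD box PySem.Set.empty
      result ++ [if PySem.Set.contains s 0 then PySem.Set.discard s 0 else s])
    []

-- ===== PORT B =====
-- the set for one box: union of the three 3-cell row slices of its band, minus {0}
def pvBoxSet (puzzle : List (List Int)) (box : Int) : PySem.Set Int :=
  let r0 := 3 * PySem.Int.floordiv box 3
  let c0 := 3 * PySem.Int.mod box 3
  -- puzzle[r] raises IndexError when r ≥ len(puzzle) (Pre_ excludes those inputs);
  -- pyGetD with default [] is the totalisation
  let row0 := PySem.List.pyGetD puzzle r0 []
  let row1 := PySem.List.pyGetD puzzle (r0 + 1) []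
  let row2 := PySem.List.pyGetD puzzle (r0 + 2) []
  PySem.Set.diff
    (PySem.Set.union
      (PySem.Set.union
        (PySem.Set.ofList (PySem.List.slice row0 (some c0) (some (c0 + 3))))
        (PySem.Set.ofList (PySem.List.slice row1 (some c0) (some (c0 + 3)))))
      (PySem.Set.ofList (PySem.List.slice row2 (some c0) (some (c0 + 3)))))
    (PySem.Set.ofList [0])

def get_box_sets_alt (puzzle : List (List Int)) : List (List Int) :=
  (PySem.List.pyRange 0 9 1).foldl
    (fun result box => result ++ [pvBoxSet puzzle box])
    []

-- ===== PRECONDITION & SPEC =====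
-- Pre_ excludes exactly the puzzles with fewer than 9 rows (a Sudoku grid has 9): below
-- 7 rows A itself raises KeyError, and on 7- or 8-row truncated grids A returns box sets
-- gathered only from the rows that exist while B's direct row indexing raises IndexError.
def Pre_get_box_sets (puzzle : List (List Int)) : Prop := 9 ≤ puzzle.length
instance (puzzle : List (List Int)) : Decidable (Pre_get_box_sets puzzle) := by
  unfold Pre_get_box_sets; infer_instance

def pvWitness_get_box_sets : List (List Int) :=
  [[5, 3, 0, 0, 7, 0, 0, 0, 0],
   [6, 0, 0, 1, 9, 5, 0, 0, 0],
   [0, 9, 8, 0, 0, 0, 0, 6, 0],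
   [8, 0, 0, 0, 6, 0, 0, 0, 3],
   [4, 0, 0, 8, 0, 3, 0, 0, 1],
   [7, 0, 0, 0, 2, 0, 0, 0, 6],
   [0, 6, 0, 0, 0, 0, 2, 8, 0],
   [0, 0, 0, 4, 1, 9, 0, 0, 5],
   [0, 0, 0, 0, 8, 0, 0, 7, 9]]

def Spec_get_box_sets (puzzle : List (List Int)) (out : List (List Int)) : Prop :=
  out = get_box_sets_alt puzzle
instance (puzzle : List (List Int)) (out : List (List Int)) : Decidable (Spec_get_box_sets puzzle out) := by
  unfold Spec_get_box_sets; infer_instance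

-- ===== CLAIM (what is proved, stated in full; the proofs are below) =====
def Claim_equal_get_box_sets : Prop :=
  ∀ (puzzle : List (List Int)), Dom_get_box_sets puzzle → Pre_get_box_sets puzzle →
    Spec_get_box_sets puzzle (get_box_sets puzzle)

-- ===== LEMMAS AND PROOFS =====

@[simp] lemma pvR9 : PySem.List.pyRange 0 9 1 = [0, 1, 2, 3, 4, 5, 6, 7, 8] := by decide
@[simp] lemma pvR3 : PySem.List.pyRange 0 3 1 = [0, 1, 2] := by decide

@[simp] lemma pvFd0 : PySem.Int.floordiv 0 3 = 0 := by decide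
@[simp] lemma pvFd1 : PySem.Int.floordiv 1 3 = 0 := by decide
@[simp] lemma pvFd2 : PySem.Int.floordiv 2 3 = 0 := by decide
@[simp] lemma pvFd3 : PySem.Int.floordiv 3 3 = 1 := by decide
@[simp] lemma pvFd4 : PySem.Int.floordiv 4 3 = 1 := by decide
@[simp] lemma pvFd5 : PySem.Int.floordiv 5 3 = 1 := by decide
@[simp] lemma pvFd6 : PySem.Int.floordiv 6 3 = 2 := by decide
@[simp] lemma pvFd7 : PySem.Int.floordiv 7 3 = 2 := by decide
@[simp] lemma pvFd8 : PySem.Int.floordiv 8 3 = 2 := by decide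
@[simp] lemma pvMd0 : PySem.Int.mod 0 3 = 0 := by decide
@[simp] lemma pvMd1 : PySem.Int.mod 1 3 = 1 := by decide
@[simp] lemma pvMd2 : PySem.Int.mod 2 3 = 2 := by decide
@[simp] lemma pvMd3 : PySem.Int.mod 3 3 = 0 := by decide
@[simp] lemma pvMd4 : PySem.Int.mod 4 3 = 1 := by decide
@[simp] lemma pvMd5 : PySem.Int.mod 5 3 = 2 := by decide
@[simp] lemma pvMd6 : PySem.Int.mod 6 3 = 0 := by decide
@[simp] lemma pvMd7 : PySem.Int.mod 7 3 = 1 := by decide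
@[simp] lemma pvMd8 : PySem.Int.mod 8 3 = 2 := by decide

@[simp] lemma pvSliceTo3 {α : Type} (xs : List α) :
    PySem.List.slice xs none (some 3) = xs.take 3 := by
  have h := PySem.List.slice_to_natCast xs 3
  simpa using h
@[simp] lemma pvSlice36 {α : Type} (xs : List α) :
    PySem.List.slice xs (some 3) (some 6) = (xs.drop 3).take 3 := by
  have h := PySem.List.slice_natCast xs 3 6
  simpa using h
@[simp] lemma pvSlice69 {α : Type} (xs : List α) :
    PySem.List.slice xs (some 6) (some 9) = (xs.drop 6).take 3 := by
  have h := PySem.List.slice_natCast xs 6 9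
  simpa using h

-- 'if 0 in s: s.remove(0)' is exactly discard
@[simp] lemma pvIfDiscard (s : PySem.Set Int) (x : Int) :
    (if PySem.Set.contains s x then PySem.Set.discard s x else s) = PySem.Set.discard s x := by
  by_cases h : PySem.Set.contains s x = true
  · rw [if_pos h]
  · have hx : x ∉ s := fun hm => h (by simpa [PySem.Set.contains_eq_listContains] using hm)
    rw [if_neg h]
    simp only [PySem.Set.discard]
    exact (List.filter_eq_self.mpr (fun a ha => by
      have hax : a ≠ x := fun e => hx (e ▸ ha)
      simp [hax])).symm

-- s - {x} is exactly discard
@[simp] lemma pvDiffSingleton (s : PySem.Set Int) (x : Int) :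
    PySem.Set.diff s (PySem.Set.ofList [x]) = PySem.Set.discard s x := by
  simp only [PySem.Set.diff, PySem.Set.discard]
  apply List.filter_congr
  intro a _
  by_cases h : a = x <;> simp [h]

-- adding a list from which an already-present element was discarded adds the same set
lemma pvFoldlAddDiscard (x : Int) :
    ∀ (t : List Int) (s : PySem.Set Int), x ∈ s →
      List.foldl PySem.Set.add s (PySem.Set.discard t x) = List.foldl PySem.Set.add s t := by
  intro t
  induction t with
  | nil => intro s _; simp [PySem.Set.discard]
  | cons y t ih =>
    intro s hx
    by_cases hyx : y = x
    · subst hyx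
      have hd : PySem.Set.discard (y :: t) y = PySem.Set.discard t y := by
        simp [PySem.Set.discard]
      rw [hd, ih s hx, List.foldl_cons, PySem.Set.add_of_mem hx]
    · have hd : PySem.Set.discard (y :: t) x = y :: PySem.Set.discard t x := by
        simp [PySem.Set.discard, hyx]
      rw [hd, List.foldl_cons, List.foldl_cons]
      exact ih (PySem.Set.add s y) ((PySem.Set.mem_add s y x).mpr (Or.inl hx))

-- adding set(xs) element-wise is the same as adding xs element-wise
lemma pvFoldlAddOfList :
    ∀ (xs : List Int) (s : PySem.Set Int),
      List.foldl PySem.Set.add s (PySem.Set.ofList xs) = List.foldl PySem.Set.add s xs := by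
  intro xs
  induction xs with
  | nil => intro s; rfl
  | cons x xs ih =>
    intro s
    rw [PySem.Set.ofList_cons, List.foldl_cons, List.foldl_cons,
        pvFoldlAddDiscard x (PySem.Set.ofList xs) (PySem.Set.add s x)
          ((PySem.Set.mem_add s x x).mpr (Or.inr rfl)), ih]

@[simp] lemma pvUpdateOfList (s : PySem.Set Int) (xs : List Int) :
    PySem.Set.update s (PySem.Set.ofList xs) = PySem.Set.update s xs :=
  pvFoldlAddOfList xs s

@[simp] lemma pvUnionEqUpdate (s t : PySem.Set Int) :
    PySem.Set.union s t = PySem.Set.update s t := rfl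

@[simp] lemma pvEmptySet : (PySem.Set.empty : PySem.Set Int) = [] := rfl

-- rows with index ≥ 9 only touch dict keys ≥ 9: lookups at boxes 0..8 are unchanged
lemma pvStepRow_getD_high (d : PySem.Dict Int (PySem.Set Int)) (n : Int) (row : List Int)
    (b : Int) (hb : b < 9) (hn : 9 ≤ n) :
    (pvStepRow d n row).getD b ([] : PySem.Set Int) = d.getD b ([] : PySem.Set Int) := by
  have hf : 3 ≤ PySem.Int.floordiv n 3 :=
    (PySem.Int.le_floordiv_iff_mul_le (by norm_num)).mpr (by omega)
  have hfe : PySem.Int.floordiv n 3 = n / 3 := PySem.Int.floordiv_eq_ediv_of_pos (by norm_num)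
  have hq : 3 ≤ n / 3 := hfe ▸ hf
  have ne0 : b ≠ 3 * (n / 3) := by omega
  have ne1 : b ≠ 3 * (n / 3) + 1 := by omega
  have ne2 : b ≠ 3 * (n / 3) + 2 := by omega
  unfold pvStepRow pvRowBoxes pvRowSlices
  rw [pvR3]
  simp only [List.map_cons, List.map_nil, List.zip_cons_cons, List.zip_nil_right,
    List.foldl_cons, List.foldl_nil]
  split_ifs <;>
    simp [PySem.Dict.getD_modify, PySem.Dict.getD_insert, ne0, ne1, ne2]

lemma pvRowLoop_getD_high :
    ∀ (t : List (List Int)) (n : Int) (d : PySem.Dict Int (PySem.Set Int)) (b : Int),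
      b < 9 → 9 ≤ n →
      (pvRowLoop t n d).getD b ([] : PySem.Set Int) = d.getD b ([] : PySem.Set Int) := by
  intro t
  induction t with
  | nil => intro n d b _ _; rfl
  | cons row t ih =>
    intro n d b hb hn
    rw [pvRowLoop, ih (n + 1) _ b hb (by omega), pvStepRow_getD_high d n row b hb hn]

-- ===== VERDICT (by name: the statement is the Claim_ definition above) =====
theorem get_box_sets_spec : Claim_equal_get_box_sets := by
  intro puzzle _ hpre
  unfold Spec_get_box_sets
  unfold Pre_get_box_sets at hpre
  rcases puzzle with _ | ⟨a0, t⟩; · simp at hpre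
  rcases t with _ | ⟨a1, t⟩; · simp at hpre
  rcases t with _ | ⟨a2, t⟩; · simp at hpre
  rcases t with _ | ⟨a3, t⟩; · simp at hpre
  rcases t with _ | ⟨a4, t⟩; · simp at hpre
  rcases t with _ | ⟨a5, t⟩; · simp at hpre
  rcases t with _ | ⟨a6, t⟩; · simp at hpre
  rcases t with _ | ⟨a7, t⟩; · simp at hpre
  rcases t with _ | ⟨a8, t⟩; · simp at hpre
  simp only [get_box_sets, get_box_sets_alt, pvR9, List.foldl_cons, List.foldl_nil,
    pvIfDiscard]
  simp [pvRowLoop, pvStepRow, pvRowBoxes, pvRowSlices, pvBoxSet,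
    pvRowLoop_getD_high, PySem.List.pyGetD_ofNat',
    PySem.Dict.getD_insert, PySem.Dict.getD_modify,
    PySem.Dict.contains_insert, PySem.Dict.contains_modify, PySem.Dict.contains_empty]
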